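-- pv_equiv track=rewrite | github.com/ziadgit/robochat | finetune/comedy/prepare_data.py | chunk_transcript
-- ===== SOURCE A (Python) =====
-- def chunk_transcript(text, comedian_name, max_chars=300):
--     """Split a standup transcript into short, usable chunks.
--
--     Extracts individual bits/segments that work as standalone comedy lines.
--     Skips metadata, stage directions, and overly short fragments.
--     """
--     lines = text.split("\n")
--     chunks = []
--     current = []
--     current_len = 0
--
--     for line in lines:
--         line = line.strip()
--         if not line:
--             if current and current_len > 50:
--                 chunks.append(" ".join(current))
--             current = []
--             current_len = 0
--             continue
--
--         # skip metadata/headers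
--         if any(kw in line.lower() for kw in [
--             "transcript", "full script", "copyright", "http", "www.",
--             "subscribe", "follow", "applause", "cheering", "laughter",
--             "[music", "[end", "[intro",
--         ]):
--             continue
--
--         current.append(line)
--         current_len += len(line)
--
--         if current_len >= max_chars:
--             chunks.append(" ".join(current))
--             current = []
--             current_len = 0
--
--     if current and current_len > 50:
--         chunks.append(" ".join(current))
--
--     return chunks
-- ===== SOURCE B (Python) =====
-- import bisect
--
-- _KEYWORDS = [
--     "transcript", "full script", "copyright", "http", "www.",
--     "subscribe", "follow", "applause", "cheering", "laughter",
--     "[music", "[end", "[intro",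
-- ]
--
--
-- def _chunk_block(block, max_chars):
--     """Chunk one blank-free block: precompute prefix sums of line lengths and
--     locate every chunk boundary with bisect (binary search), then emit slices."""
--     kept = [l for l in block if not any(kw in l.lower() for kw in _KEYWORDS)]
--     prefix = [0]
--     for l in kept:
--         prefix.append(prefix[-1] + len(l))
--     n = len(kept)
--     out = []
--     j = 0
--     while True:
--         i = bisect.bisect_left(prefix, prefix[j] + max_chars, j + 1)
--         if i > n:
--             break
--         out.append(" ".join(kept[j:i]))
--         j = i
--     if prefix[n] - prefix[j] > 50:
--         out.append(" ".join(kept[j:]))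
--     return out
--
--
-- def chunk_transcript(text, comedian_name, max_chars=300):
--     chunks = []
--     block = []
--     for line in [l.strip() for l in text.split("\n")] + [""]:
--         if line:
--             block.append(line)
--         else:
--             chunks += _chunk_block(block, max_chars)
--             block = []
--     return chunks
-- ===== Notes on version B (the rewrite author's own statement) =====
-- stated objective: alternative
-- what changed: Replaces A's single running-length accumulator state machine by a staged algorithm: strip all lines up front, gather blank-separated blocks, and inside each block precompute prefix sums of the kept line lengths and find every chunk boundary by binary search (bisect_left) over the prefix-sum array, emitting chunks as slices kept[j:i] instead of maintaining a growing current list.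
import Mathlib
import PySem

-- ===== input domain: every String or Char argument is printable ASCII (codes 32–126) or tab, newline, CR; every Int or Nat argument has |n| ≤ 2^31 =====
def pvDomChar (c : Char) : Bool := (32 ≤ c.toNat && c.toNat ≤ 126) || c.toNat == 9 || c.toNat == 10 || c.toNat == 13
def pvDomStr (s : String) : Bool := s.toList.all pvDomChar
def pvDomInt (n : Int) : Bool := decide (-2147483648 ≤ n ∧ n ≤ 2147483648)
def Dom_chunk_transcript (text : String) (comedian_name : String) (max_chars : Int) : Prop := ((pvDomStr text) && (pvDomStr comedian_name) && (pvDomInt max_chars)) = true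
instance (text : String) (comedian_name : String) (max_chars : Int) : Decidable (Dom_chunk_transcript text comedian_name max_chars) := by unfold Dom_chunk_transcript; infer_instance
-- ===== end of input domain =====

-- B replaces A's running-length accumulator state machine by a staged pass: strip lines,
-- gather blank-separated blocks, then per block precompute prefix sums of kept line lengths
-- and locate every chunk boundary with bisect (binary search), emitting slices.
-- Objective: alternative decomposition, same cost.

-- ===== PORT A =====
def pvKeywords : List String :=
  ["transcript", "full script", "copyright", "http", "www.",
   "subscribe", "follow", "applause", "cheering", "laughter",
   "[music", "[end", "[intro"]

def pvIsMetaA (line : String) : Bool :=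
  pvKeywords.any (fun kw => PySem.Str.isIn kw (PySem.Str.lower line))

-- A's loop body, over the state (chunks, current, current_len)
def pvStepA (max_chars : Int) (st : List String × List String × Int) (rawline : String)
    : List String × List String × Int :=
  let line := PySem.Str.strip rawline
  if line = "" then
    (if !st.2.1.isEmpty && st.2.2 > 50 then st.1 ++ [PySem.Str.join " " st.2.1] else st.1, [], 0)
  else if pvIsMetaA line then st
  else
    let current := st.2.1 ++ [line]
    let current_len := st.2.2 + PySem.Str.len line
    if current_len ≥ max_chars then (st.1 ++ [PySem.Str.join " " current], [], 0)
    else (st.1, current, current_len)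

def chunk_transcript (text : String) (comedian_name : String) (max_chars : Int) : List String :=
  let lines := (PySem.Str.split? text "\n").getD []
  let st := lines.foldl (pvStepA max_chars) ([], [], 0)
  if !st.2.1.isEmpty && st.2.2 > 50 then st.1 ++ [PySem.Str.join " " st.2.1] else st.1

-- ===== PORT B =====
def pvIsMetaB (line : String) : Bool :=
  (PySem.Str.lower line) |> (fun low => pvKeywords.any (fun kw => PySem.Str.isIn kw low))

-- prefix sums of kept line lengths (Python: prefix = [0]; for l in kept: prefix.append(prefix[-1]+len(l)))
def pvPrefix (kept : List String) : List Int :=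
  kept.foldl (fun p l => p ++ [p.getLastD 0 + PySem.Str.len l]) [0]

-- port of the stdlib call bisect.bisect_left(l, target, lo): first index ≥ lo whose entry is ≥ target
-- (exact on nondecreasing lists — pvPrefix is nondecreasing since lengths are ≥ 0)
def pvBisectGo (l : List Int) (target : Int) (i : Nat) : Nat :=
  if h : i < l.length then (if target ≤ l[i] then i else pvBisectGo l target (i + 1)) else i
termination_by l.length - i

-- B's while-loop: repeatedly bisect for the next cut point i, emit the slice kept[j:i]
-- (the conjunct 'j < i' is a termination guard; pvBisectGo from j+1 always returns > j)
def pvCutLoop (m : Int) (kept : List String) (pre : List Int) (n j : Nat) (acc : List String)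
    : List String × Nat :=
  let i := pvBisectGo pre (pre.getD j 0 + m) (j + 1)
  if h : i ≤ n ∧ j < i then
    pvCutLoop m kept pre n i (acc ++ [PySem.Str.join " " ((kept.drop j).take (i - j))])
  else (acc, j)
termination_by n - j
decreasing_by omega

def pvChunkBlockB (m : Int) (block : List String) : List String :=
  let kept := block.filter (fun l => !pvIsMetaB l)
  let pre := pvPrefix kept
  let n := kept.length
  let r := pvCutLoop m kept pre n 0 []
  if pre.getD n 0 - pre.getD r.2 0 > 50 then r.1 ++ [PySem.Str.join " " (kept.drop r.2)] else r.1

-- B's outer loop body, over the state (chunks, block)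
def pvOuterStep (m : Int) (st : List String × List String) (line : String)
    : List String × List String :=
  if line ≠ "" then (st.1, st.2 ++ [line])
  else (st.1 ++ pvChunkBlockB m st.2, [])

def chunk_transcript_alt (text : String) (comedian_name : String) (max_chars : Int) : List String :=
  let stripped := ((PySem.Str.split? text "\n").getD []).map PySem.Str.strip
  ((stripped ++ [""]).foldl (pvOuterStep max_chars) ([], [])).1

-- ===== PRECONDITION & SPEC =====
def Spec_chunk_transcript (text : String) (comedian_name : String) (max_chars : Int) (out : List String) : Prop := out = chunk_transcript_alt text comedian_name max_chars
instance (text : String) (comedian_name : String) (max_chars : Int) (out : List String) : Decidable (Spec_chunk_transcript text comedian_name max_chars out) := by unfold Spec_chunk_transcript; infer_instance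

-- ===== CLAIM (what is proved, stated in full; the proofs are below) =====
def Claim_equal_chunk_transcript : Prop := ∀ (text : String) (comedian_name : String) (max_chars : Int), Dom_chunk_transcript text comedian_name max_chars → Spec_chunk_transcript text comedian_name max_chars (chunk_transcript text comedian_name max_chars)

-- ===== LEMMAS AND PROOFS =====

-- ---- proof-side middle form: A's state machine decomposed into blank-separated blocks,
-- ---- each chunked by a per-line fold (this was the shape of A's loop inside a block)

def pvStepCore (m : Int) (st : List String × List String × Int) (line : String)
    : List String × List String × Int :=
  let cur := st.2.1 ++ [line]
  let cl := st.2.2 + PySem.Str.len line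
  if cl ≥ m then (st.1 ++ [PySem.Str.join " " cur], [], 0) else (st.1, cur, cl)

def pvStepB (m : Int) (st : List String × List String × Int) (rawline : String)
    : List String × List String × Int :=
  let line := PySem.Str.strip rawline
  if pvIsMetaA line then st else pvStepCore m st line

def pvChunkBlock (m : Int) (blk : List String) : List String :=
  let st := blk.foldl (pvStepB m) ([], [], 0)
  if !st.2.1.isEmpty && st.2.2 > 50 then st.1 ++ [PySem.Str.join " " st.2.1] else st.1

def pvBlocks : List String → List (List String)
  | [] => []
  | l :: rest =>
    if PySem.Str.strip l = "" then pvBlocks rest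
    else
      (l :: rest.takeWhile (fun x => !(PySem.Str.strip x = ""))) ::
        pvBlocks (rest.dropWhile (fun x => !(PySem.Str.strip x = "")))
termination_by l => l.length
decreasing_by
  · simp
  · have := List.length_dropWhile_le (fun x => !(PySem.Str.strip x = "")) rest
    simp; omega

theorem stepA_eq_stepB (m : Int) (st : List String × List String × Int) (l : String)
    (h : ¬ PySem.Str.strip l = "") : pvStepA m st l = pvStepB m st l := by
  simp [pvStepA, pvStepB, pvStepCore, h]

-- chunks accumulated so far pass through pvStepB untouched (it only appends)
theorem foldB_prefix (m : Int) (blk : List String) (c : List String) (cur : List String) (n : Int) :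
    blk.foldl (pvStepB m) (c, cur, n)
      = (c ++ (blk.foldl (pvStepB m) ([], cur, n)).1,
         (blk.foldl (pvStepB m) ([], cur, n)).2) := by
  induction blk generalizing c cur n with
  | nil => simp
  | cons x xs ih =>
    simp only [List.foldl_cons]
    rw [ih, ih (pvStepB m ([], cur, n) x).1]
    simp [pvStepB, pvStepCore]
    split_ifs <;> simp

theorem chunkBlock_flush (m : Int) (blk : List String) (c : List String) :
    (fun st : List String × List String × Int =>
        if !st.2.1.isEmpty && st.2.2 > 50 then st.1 ++ [PySem.Str.join " " st.2.1] else st.1)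
      (c ++ (blk.foldl (pvStepB m) ([], [], 0)).1, (blk.foldl (pvStepB m) ([], [], 0)).2)
    = c ++ pvChunkBlock m blk := by
  unfold pvChunkBlock
  generalize blk.foldl (pvStepB m) ([], [], 0) = st
  obtain ⟨cs, cur, n⟩ := st
  simp only []
  split_ifs <;> simp

theorem stepA_blank_flush (m : Int) (d : String) (c : List String) (blk : List String)
    (hdb : PySem.Str.strip d = "") :
    pvStepA m (c ++ (blk.foldl (pvStepB m) ([], [], 0)).1, (blk.foldl (pvStepB m) ([], [], 0)).2) d
    = (c ++ pvChunkBlock m blk, [], 0) := by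
  unfold pvStepA pvChunkBlock
  generalize blk.foldl (pvStepB m) ([], [], 0) = st
  obtain ⟨cs, cur, n⟩ := st
  simp only [hdb, if_pos]
  split_ifs <;> simp_all

theorem main_invariant (m : Int) (lines : List String) (c : List String) :
    (fun st : List String × List String × Int =>
        if !st.2.1.isEmpty && st.2.2 > 50 then st.1 ++ [PySem.Str.join " " st.2.1] else st.1)
      (lines.foldl (pvStepA m) (c, [], 0))
    = (pvBlocks lines).foldl (fun chunks blk => chunks ++ pvChunkBlock m blk) c := by
  induction hn : lines.length using Nat.strong_induction_on generalizing lines c with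
  | _ n ih =>
  match lines with
  | [] => simp [pvBlocks]
  | l :: rest =>
    by_cases hb : PySem.Str.strip l = ""
    · have h1 : pvStepA m (c, [], 0) l = (c, [], 0) := by simp [pvStepA, hb]
      rw [pvBlocks, if_pos hb, List.foldl_cons, h1]
      exact ih rest.length (by simp [← hn]) rest c rfl
    · rw [pvBlocks, if_neg hb]
      set p : String → Bool := fun x => !(PySem.Str.strip x = "") with hp
      have hsplit : rest = rest.takeWhile p ++ rest.dropWhile p := (List.takeWhile_append_dropWhile).symm
      have hblkA : ∀ (st : List String × List String × Int),
          (l :: rest.takeWhile p).foldl (pvStepA m) st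
          = (l :: rest.takeWhile p).foldl (pvStepB m) st := by
        intro st
        apply PySem.List.foldl_congr_mem
        intro a x hx
        rcases List.mem_cons.mp hx with h | h
        · exact stepA_eq_stepB m a x (h ▸ hb)
        · have := List.mem_takeWhile_imp h
          simp [hp] at this
          exact stepA_eq_stepB m a x this
      have hcons : l :: rest = (l :: rest.takeWhile p) ++ rest.dropWhile p := by
        rw [List.cons_append, ← hsplit]
      conv_lhs => rw [hcons, List.foldl_append, hblkA]
      rw [foldB_prefix]
      rcases hdw : rest.dropWhile p with _ | ⟨d, ds⟩
      · rw [List.foldl_nil]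
        have hnil : pvBlocks ([] : List String) = [] := by rw [pvBlocks]
        rw [hnil]
        conv_rhs => rw [List.foldl_cons, List.foldl_nil]
        exact chunkBlock_flush m (l :: rest.takeWhile p) c
      · have hdb : PySem.Str.strip d = "" := by
          have hne : rest.dropWhile p ≠ [] := by simp [hdw]
          have h := List.head_dropWhile_not p (l := rest) hne
          have h3 : (rest.dropWhile p).head hne = d := by simp [hdw]
          rw [h3, hp] at h
          simpa using h
        rw [List.foldl_cons, stepA_blank_flush m d c (l :: rest.takeWhile p) hdb]
        have hlen : ds.length < n := by
          have h2 : (rest.dropWhile p).length ≤ rest.length := List.length_dropWhile_le p rest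
          rw [hdw] at h2; simp at h2
          have h3 : rest.length + 1 = n := by simpa using hn
          omega
        rw [ih ds.length hlen ds _ rfl]
        have hdd : pvBlocks (d :: ds) = pvBlocks ds := by rw [pvBlocks, if_pos hdb]
        rw [← hdd, List.foldl_cons]

-- ---- prefix-sum characterisation

def pvS (kept : List String) (k : Nat) : Int := ((kept.take k).map PySem.Str.len).sum

theorem prefix_spec (kept : List String) :
    pvPrefix kept = (List.range (kept.length + 1)).map (pvS kept) := by
  induction kept using List.reverseRecOn with
  | nil => simp [pvPrefix, pvS]
  | append_singleton ks x ih =>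
    unfold pvPrefix at ih ⊢
    rw [List.foldl_append, List.foldl_cons, List.foldl_nil, ih]
    have hlast : (((List.range (ks.length + 1)).map (pvS ks)).getLastD 0) = pvS ks ks.length := by
      rw [List.range_succ, List.map_append]
      simp
    rw [hlast]
    have hrange : List.range (ks.length + 1 + 1) = List.range (ks.length + 1) ++ [ks.length + 1] := by
      rw [List.range_succ]
    rw [show (ks ++ [x]).length = ks.length + 1 by simp, hrange, List.map_append]
    congr 1
    · apply List.map_congr_left
      intro k hk
      have hk' : k ≤ ks.length := by
        have := List.mem_range.mp hk; omega
      unfold pvS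
      rw [List.take_append_of_le_length hk']
    · simp only [List.map_cons, List.map_nil]
      congr 1
      unfold pvS
      rw [List.take_of_length_le (by simp), List.take_of_length_le (by simp)]
      simp

theorem prefix_getD (kept : List String) (k : Nat) (hk : k ≤ kept.length) :
    (pvPrefix kept).getD k 0 = pvS kept k := by
  rw [prefix_spec]
  rw [List.getD_eq_getElem _ _ (by simp; omega)]
  simp

theorem prefix_length (kept : List String) : (pvPrefix kept).length = kept.length + 1 := by
  rw [prefix_spec]; simp

theorem pvS_succ (kept : List String) (k : Nat) (hk : k < kept.length) :
    pvS kept (k + 1) = pvS kept k + PySem.Str.len kept[k] := by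
  unfold pvS
  rw [List.take_add_one, List.getElem?_eq_getElem hk]
  rw [Option.toList_some, List.map_append, List.sum_append]
  simp

-- ---- bisect characterisation

theorem go_ge (l : List Int) (t : Int) (i : Nat) : i ≤ pvBisectGo l t i := by
  induction hd : l.length - i using Nat.strong_induction_on generalizing i with
  | _ d ih =>
    rw [pvBisectGo]
    split
    · split
      · exact le_refl _
      · have h2 := ih (l.length - (i + 1)) (by omega) (i + 1) rfl
        omega
    · exact le_refl _

theorem go_le (l : List Int) (t : Int) (i : Nat) (h : i ≤ l.length) : pvBisectGo l t i ≤ l.length := by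
  induction hd : l.length - i using Nat.strong_induction_on generalizing i with
  | _ d ih =>
    rw [pvBisectGo]
    split
    · split
      · omega
      · exact ih (l.length - (i + 1)) (by omega) (i + 1) (by omega) rfl
    · exact h

theorem go_before (l : List Int) (t : Int) (i k : Nat) (h1 : i ≤ k) (h2 : k < pvBisectGo l t i)
    (hk : k < l.length) : l.getD k 0 < t := by
  induction hd : l.length - i using Nat.strong_induction_on generalizing i with
  | _ d ih =>
    rw [pvBisectGo] at h2
    by_cases hl : i < l.length
    · rw [dif_pos hl] at h2
      by_cases ht : t ≤ l[i]
      · rw [if_pos ht] at h2; omega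
      · rw [if_neg ht] at h2
        by_cases hik : i = k
        · subst hik
          rw [List.getD_eq_getElem _ _ hl]
          omega
        · exact ih (l.length - (i + 1)) (by omega) (i + 1) (by omega) h2 rfl
    · rw [dif_neg hl] at h2; omega

theorem go_hit (l : List Int) (t : Int) (i : Nat) (h : pvBisectGo l t i < l.length) :
    t ≤ l.getD (pvBisectGo l t i) 0 := by
  induction hd : l.length - i using Nat.strong_induction_on generalizing i with
  | _ d ih =>
    rw [pvBisectGo] at h ⊢
    by_cases hl : i < l.length
    · rw [dif_pos hl] at h ⊢
      by_cases ht : t ≤ l[i]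
      · rw [if_pos ht] at h ⊢
        rw [List.getD_eq_getElem _ _ hl]
        exact ht
      · rw [if_neg ht] at h ⊢
        exact ih (l.length - (i + 1)) (by omega) (i + 1) h rfl
    · rw [dif_neg hl] at h ⊢
      omega

-- ---- the inner fold over a block equals the bisect cut loop

theorem seg_fold (m : Int) (kept : List String) (j k : Nat) (hjk : j ≤ k) (hk : k ≤ kept.length)
    (hno : ∀ t, j < t → t ≤ k → pvS kept t - pvS kept j < m) (acc : List String) :
    (kept.drop j).foldl (pvStepCore m) (acc, [], 0)
      = (kept.drop k).foldl (pvStepCore m) (acc, (kept.drop j).take (k - j), pvS kept k - pvS kept j) := by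
  induction k, hjk using Nat.le_induction with
  | base => simp
  | succ k hjk2 ih =>
    rw [ih (by omega) (fun t ht1 ht2 => hno t ht1 (by omega))]
    have hkl : k < kept.length := by omega
    rw [List.drop_eq_getElem_cons hkl, List.foldl_cons]
    have hcl : pvS kept (k + 1) = pvS kept k + PySem.Str.len kept[k] := pvS_succ kept k hkl
    have hlt : pvS kept (k + 1) - pvS kept j < m := hno (k + 1) (by omega) (le_refl _)
    have htake : (kept.drop j).take (k - j) ++ [kept[k]] = (kept.drop j).take (k + 1 - j) := by
      have h1 : k + 1 - j = (k - j) + 1 := by omega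
      rw [h1, List.take_add_one]
      have h2 : k - j < (kept.drop j).length := by simp; omega
      rw [List.getElem?_eq_getElem h2]
      congr 2
      simp
      congr 1
      omega
    have hstep : pvStepCore m (acc, (kept.drop j).take (k - j), pvS kept k - pvS kept j) kept[k]
        = (acc, (kept.drop j).take (k + 1 - j), pvS kept (k + 1) - pvS kept j) := by
      simp only [pvStepCore]
      rw [if_neg (by omega), htake]
      simp only [Prod.mk.injEq, true_and]
      omega
    rw [hstep]

theorem cutLoop_eq (m : Int) (kept : List String) (pre : List Int) (n j : Nat) (acc : List String) :
    pvCutLoop m kept pre n j acc =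
      if pvBisectGo pre (pre.getD j 0 + m) (j + 1) ≤ n ∧ j < pvBisectGo pre (pre.getD j 0 + m) (j + 1)
      then pvCutLoop m kept pre n (pvBisectGo pre (pre.getD j 0 + m) (j + 1))
             (acc ++ [PySem.Str.join " " ((kept.drop j).take (pvBisectGo pre (pre.getD j 0 + m) (j + 1) - j))])
      else (acc, j) := by
  rw [pvCutLoop]
  simp only [dite_eq_ite]

theorem cutLoop_le (m : Int) (kept : List String) (pre : List Int) (n j : Nat) (hj : j ≤ n)
    (acc : List String) : (pvCutLoop m kept pre n j acc).2 ≤ n := by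
  induction hd : n - j using Nat.strong_induction_on generalizing j acc with
  | _ d ih =>
    rw [cutLoop_eq]
    split_ifs with h
    · exact ih (n - pvBisectGo pre (pre.getD j 0 + m) (j + 1)) (by omega) _ (by omega) _ rfl
    · exact hj

theorem cut_fold (m : Int) (kept : List String) (j : Nat) (hj : j ≤ kept.length) (acc : List String) :
    (kept.drop j).foldl (pvStepCore m) (acc, [], 0)
      = ((pvCutLoop m kept (pvPrefix kept) kept.length j acc).1,
         kept.drop (pvCutLoop m kept (pvPrefix kept) kept.length j acc).2,
         pvS kept kept.length - pvS kept (pvCutLoop m kept (pvPrefix kept) kept.length j acc).2) := by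
  induction hd : kept.length - j using Nat.strong_induction_on generalizing j acc with
  | _ d ih =>
    have hlenP : (pvPrefix kept).length = kept.length + 1 := prefix_length kept
    set P := pvPrefix kept with hP
    set n := kept.length with hn
    set i := pvBisectGo P (P.getD j 0 + m) (j + 1) with hi
    have hige : j + 1 ≤ i := go_ge P (P.getD j 0 + m) (j + 1)
    have hile : i ≤ n + 1 := by
      have := go_le P (P.getD j 0 + m) (j + 1) (by omega)
      omega
    have hPj : P.getD j 0 = pvS kept j := prefix_getD kept j hj
    by_cases hc : i ≤ n
    · -- a cut at i: lines j..i-2 accumulate below the threshold, line i-1 triggers the flush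
      have hseg := seg_fold m kept j (i - 1) (by omega) (by omega)
          (fun t ht1 ht2 => by
            have hb := go_before P (P.getD j 0 + m) (j + 1) t (by omega) (by omega) (by omega)
            rw [hPj, prefix_getD kept t (by omega)] at hb
            omega) acc
      rw [hseg]
      have hi1l : i - 1 < n := by omega
      have hdropi : kept.drop (i - 1) = kept[i - 1] :: kept.drop (i - 1 + 1) :=
        List.drop_eq_getElem_cons hi1l
      have hi11 : i - 1 + 1 = i := by omega
      rw [hi11] at hdropi
      rw [hdropi, List.foldl_cons]
      have hSi : pvS kept i = pvS kept (i - 1) + PySem.Str.len kept[i - 1] := by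
        have := pvS_succ kept (i - 1) hi1l
        rw [hi11] at this
        exact this
      have hhit : P.getD j 0 + m ≤ P.getD i 0 := by
        have := go_hit P (P.getD j 0 + m) (j + 1) (by omega)
        rw [← hi] at this
        exact this
      rw [hPj, prefix_getD kept i (by omega)] at hhit
      have htake : (kept.drop j).take (i - 1 - j) ++ [kept[i - 1]] = (kept.drop j).take (i - j) := by
        have h1 : i - j = (i - 1 - j) + 1 := by omega
        rw [h1, List.take_add_one]
        have h2 : i - 1 - j < (kept.drop j).length := by simp; omega
        rw [List.getElem?_eq_getElem h2]
        congr 2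
        simp
        congr 1
        omega
      have hstep : pvStepCore m (acc, (kept.drop j).take (i - 1 - j), pvS kept (i - 1) - pvS kept j) kept[i - 1]
          = (acc ++ [PySem.Str.join " " ((kept.drop j).take (i - j))], [], 0) := by
        simp only [pvStepCore]
        rw [if_pos (by omega), htake]
      rw [hstep]
      have hcut : pvCutLoop m kept P n j acc
          = pvCutLoop m kept P n i (acc ++ [PySem.Str.join " " ((kept.drop j).take (i - j))]) := by
        rw [cutLoop_eq m kept P n j acc, ← hi, if_pos ⟨hc, by omega⟩]
      rw [hcut]
      exact ih (n - i) (by omega) i hc _ rfl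
    · -- no further cut: everything from j accumulates and stays as the residue
      have hin : i = n + 1 := by omega
      have hseg := seg_fold m kept j n (by omega) (le_refl _)
          (fun t ht1 ht2 => by
            have hb := go_before P (P.getD j 0 + m) (j + 1) t (by omega) (by omega) (by omega)
            rw [hPj, prefix_getD kept t (by omega)] at hb
            omega) acc
      rw [hseg]
      rw [cutLoop_eq m kept P n j acc, ← hi, if_neg (by omega)]
      rw [List.take_of_length_le (by simp; omega), hn, List.drop_length, List.foldl_nil]

-- ---- per-block equality: A's block fold = B's bisect chunker on the stripped block

theorem meta_BA : pvIsMetaB = pvIsMetaA := by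
  funext l
  rfl

theorem block_eq (m : Int) (blk : List String) :
    pvChunkBlock m blk = pvChunkBlockB m (blk.map PySem.Str.strip) := by
  unfold pvChunkBlock pvChunkBlockB
  simp only [meta_BA]
  set kept := (blk.map PySem.Str.strip).filter (fun l => !pvIsMetaA l) with hkept
  have hfold : blk.foldl (pvStepB m) ([], [], 0) = kept.foldl (pvStepCore m) ([], [], 0) := by
    have h1 : blk.foldl (pvStepB m) ([], [], 0)
        = (blk.map PySem.Str.strip).foldl
            (fun st l => if (!pvIsMetaA l) = true then pvStepCore m st l else st) ([], [], 0) := by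
      rw [List.foldl_map]
      apply PySem.List.foldl_congr_mem
      intro a x _
      by_cases hm : pvIsMetaA (PySem.Str.strip x)
      · simp [pvStepB, hm]
      · simp [pvStepB, hm]
    rw [h1, PySem.List.foldl_if_eq_foldl_filter]
  rw [hfold]
  have hcf := cut_fold m kept 0 (Nat.zero_le _) []
  rw [List.drop_zero] at hcf
  rw [hcf]
  set r := pvCutLoop m kept (pvPrefix kept) kept.length 0 [] with hr
  have hr2 : r.2 ≤ kept.length := cutLoop_le m kept (pvPrefix kept) kept.length 0 (Nat.zero_le _) []
  rw [prefix_getD kept kept.length (le_refl _), prefix_getD kept r.2 hr2]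
  by_cases h50 : pvS kept kept.length - pvS kept r.2 > 50
  · have hne : kept.drop r.2 ≠ [] := by
      intro hnil
      rw [List.drop_eq_nil_iff] at hnil
      have hr2e : r.2 = kept.length := by omega
      rw [hr2e] at h50
      omega
    rw [if_pos (by simp [hne]; exact h50), if_pos h50]
  · rw [if_neg (by simp; intro _; omega), if_neg h50]

-- ---- outer equality

theorem chunkB_nil (m : Int) : pvChunkBlockB m [] = [] := by
  have hcut : pvCutLoop m [] (pvPrefix []) 0 0 [] = ([], 0) := by
    rw [cutLoop_eq]
    rw [show pvBisectGo (pvPrefix ([] : List String))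
        ((pvPrefix ([] : List String)).getD 0 0 + m) 1 = 1 from by
      rw [pvBisectGo]
      simp [pvPrefix]]
    simp
  unfold pvChunkBlockB
  simp only [List.filter_nil, List.length_nil]
  rw [hcut]
  simp [pvPrefix]

theorem outer_pass (m : Int) (bs : List String) (hbs : ∀ x ∈ bs, x ≠ "") (c b : List String) :
    bs.foldl (pvOuterStep m) (c, b) = (c, b ++ bs) := by
  induction bs generalizing b with
  | nil => simp
  | cons x xs ih =>
    rw [List.foldl_cons]
    have hx : x ≠ "" := hbs x (by simp)
    rw [show pvOuterStep m (c, b) x = (c, b ++ [x]) from by simp [pvOuterStep, hx]]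
    rw [ih (fun y hy => hbs y (by simp [hy])) (b ++ [x])]
    simp

theorem outer_eq (m : Int) (lines : List String) (c : List String) :
    ((lines.map PySem.Str.strip ++ [""]).foldl (pvOuterStep m) (c, [])).1
      = (pvBlocks lines).foldl (fun chunks blk => chunks ++ pvChunkBlockB m (blk.map PySem.Str.strip)) c := by
  induction hn : lines.length using Nat.strong_induction_on generalizing lines c with
  | _ n ih =>
  match lines with
  | [] =>
    rw [pvBlocks]
    simp [pvOuterStep, chunkB_nil]
  | l :: rest =>
    by_cases hb : PySem.Str.strip l = ""
    · simp only [List.map_cons, hb, List.cons_append, List.foldl_cons]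
      rw [show pvOuterStep m (c, []) "" = (c, []) from by simp [pvOuterStep, chunkB_nil]]
      rw [pvBlocks, if_pos hb]
      exact ih rest.length (by simp [← hn]) rest c rfl
    · rw [pvBlocks, if_neg hb]
      set p : String → Bool := fun x => !(PySem.Str.strip x = "") with hp
      have hsplit : rest = rest.takeWhile p ++ rest.dropWhile p := (List.takeWhile_append_dropWhile).symm
      have hdecomp : (l :: rest).map PySem.Str.strip ++ [""]
          = ((l :: rest.takeWhile p).map PySem.Str.strip)
            ++ ((rest.dropWhile p).map PySem.Str.strip ++ [""]) := by
        conv_lhs => rw [show l :: rest = (l :: rest.takeWhile p) ++ rest.dropWhile p from by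
          rw [List.cons_append, ← hsplit]]
        rw [List.map_append, List.append_assoc]
      rw [hdecomp, List.foldl_append]
      have hall : ∀ x ∈ (l :: rest.takeWhile p).map PySem.Str.strip, x ≠ "" := by
        intro x hx
        rcases List.mem_map.mp hx with ⟨y, hy, hxy⟩
        rcases List.mem_cons.mp hy with h | h
        · rw [← hxy, h]; exact hb
        · have := List.mem_takeWhile_imp h
          simp [hp] at this
          rw [← hxy]; exact this
      rw [outer_pass m _ hall c []]
      simp only [List.nil_append]
      have hflush : ∀ b : List String, pvOuterStep m (c, b) "" = (c ++ pvChunkBlockB m b, []) :=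
        fun b => by simp [pvOuterStep]
      rcases hdw : rest.dropWhile p with _ | ⟨d, ds⟩
      · simp only [List.map_nil, List.nil_append, List.foldl_cons, List.foldl_nil]
        rw [hflush]
        have hnil : pvBlocks ([] : List String) = [] := by rw [pvBlocks]
        rw [hnil]
        simp
      · have hdb : PySem.Str.strip d = "" := by
          have hne : rest.dropWhile p ≠ [] := by simp [hdw]
          have h := List.head_dropWhile_not p (l := rest) hne
          have h3 : (rest.dropWhile p).head hne = d := by simp [hdw]
          rw [h3, hp] at h
          simpa using h
        simp only [List.map_cons, hdb, List.cons_append, List.foldl_cons]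
        rw [hflush]
        have hlen : ds.length < n := by
          have h2 : (rest.dropWhile p).length ≤ rest.length := List.length_dropWhile_le p rest
          rw [hdw] at h2; simp at h2
          have h3 : rest.length + 1 = n := by simpa using hn
          omega
        rw [ih ds.length hlen ds _ rfl]
        have hdd : pvBlocks (d :: ds) = pvBlocks ds := by rw [pvBlocks, if_pos hdb]
        rw [hdd]

-- ===== VERDICT (by name: the statement is the Claim_ definition above) =====
theorem chunk_transcript_spec : Claim_equal_chunk_transcript := by
  intro text name m _
  unfold Spec_chunk_transcript
  refine Eq.trans (main_invariant m ((PySem.Str.split? text "\n").getD []) []) ?_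
  refine Eq.trans ?_ (outer_eq m ((PySem.Str.split? text "\n").getD []) []).symm
  apply PySem.List.foldl_congr_mem
  intro a x _
  rw [block_eq]
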